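-- pv_equiv track=rewrite | github.com/mrvgao/ChineseWordSegment | summary/text_summary.py | get_sentence_begin_index
-- ===== SOURCE A (Python) =====
-- def forward_alpha(text : str, index, direction='right'):
--     if direction == 'right': index += 1
--     else: index -= 1
--
--     if 0 <= index < len(text):
--         return text[index].isalpha()
--
--     return False
--
-- def get_sentence_begin_index(sub_str: str, text: str, end_marks: list, special_beginning):
--     begin_index = text.index(sub_str)
--
--     begin_length = 20
--     while begin_index >= 0:
--         if text[begin_index] in end_marks: break
--         elif text[begin_index] == ' ' and not forward_alpha(text, begin_index, 'left'): break
--         elif begin_index < begin_length and text[begin_index] in special_beginning: break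
--         begin_index -= 1
--
--     return begin_index
-- ===== SOURCE B (Python) =====
-- def get_sentence_begin_index(sub_str: str, text: str, end_marks: list, special_beginning):
--     begin_index = text.index(sub_str)
--     result = -1
--     for i in range(begin_index + 1):
--         c = text[i]
--         if (c in end_marks
--                 or (c == ' ' and not (0 <= i - 1 < len(text) and text[i - 1].isalpha()))
--                 or (i < 20 and c in special_beginning)):
--             result = i
--     return result
-- ===== Notes on version B (the rewrite author's own statement) =====
-- stated objective: alternative
-- what changed: Replaces A's backward early-exit while-loop from the match position with a single forward pass over the prefix that keeps the last boundary index seen (the boundary predicate is unchanged).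
-- outside the precondition, e.g. on get_sentence_begin_index('x', 'abc', ['.'], []): A raises ValueError, B raises ValueError; on get_sentence_begin_index('', '', ['.'], []): A raises IndexError, B raises IndexError
import Mathlib
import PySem

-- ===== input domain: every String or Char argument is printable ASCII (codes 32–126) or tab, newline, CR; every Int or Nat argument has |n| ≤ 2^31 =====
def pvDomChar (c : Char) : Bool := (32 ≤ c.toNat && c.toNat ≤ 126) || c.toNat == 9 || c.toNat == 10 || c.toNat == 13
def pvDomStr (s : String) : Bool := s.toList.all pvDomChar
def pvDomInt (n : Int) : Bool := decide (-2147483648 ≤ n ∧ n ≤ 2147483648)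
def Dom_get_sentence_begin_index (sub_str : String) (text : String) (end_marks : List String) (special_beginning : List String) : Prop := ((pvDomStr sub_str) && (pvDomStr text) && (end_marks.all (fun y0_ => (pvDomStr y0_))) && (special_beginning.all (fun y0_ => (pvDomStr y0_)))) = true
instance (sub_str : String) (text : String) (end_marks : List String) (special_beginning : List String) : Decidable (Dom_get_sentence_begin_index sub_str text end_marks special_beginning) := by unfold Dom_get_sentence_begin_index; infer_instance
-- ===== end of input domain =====

-- B replaces A's backward early-exit while-loop by a single forward pass that keeps the last
-- boundary index seen (objective: alternative decomposition, same cost).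

-- ===== PORT A =====
-- helper forward_alpha, transliterated
def pv_forward_alpha (text : String) (index : Int) (direction : String) : Bool :=
  let index := if direction == "right" then index + 1 else index - 1
  if 0 ≤ index ∧ index < (text.length : Int) then
    PySem.Chars.isalpha (text.toList.getD index.toNat ' ')
  else false

-- the three break conditions of A's while-loop body, in order
def pvCondA (text : String) (end_marks special_beginning : List String) (i : Int) : Bool :=
  let c := String.singleton (text.toList.getD i.toNat ' ')
  if end_marks.contains c then true
  else if c == " " && !(pv_forward_alpha text i "left") then true
  else if i < 20 && special_beginning.contains c then true
  else false

-- A's 'while begin_index >= 0: … begin_index -= 1'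
def pvLoopA (text : String) (end_marks special_beginning : List String) (begin_index : Int) : Int :=
  if h : 0 ≤ begin_index then
    if pvCondA text end_marks special_beginning begin_index then begin_index
    else pvLoopA text end_marks special_beginning (begin_index - 1)
  else begin_index
termination_by (begin_index + 1).toNat
decreasing_by omega

def get_sentence_begin_index (sub_str : String) (text : String) (end_marks : List String) (special_beginning : List String) : Int :=
  pvLoopA text end_marks special_beginning (PySem.Str.find text sub_str)

-- ===== PORT B =====
-- B's boundary predicate (forward_alpha inlined as in Source B)
def pvCondB (text : String) (end_marks special_beginning : List String) (i : Int) : Bool :=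
  let c := String.singleton (text.toList.getD i.toNat ' ')
  end_marks.contains c
  || (c == " " && !(decide (0 ≤ i - 1) && decide (i - 1 < (text.length : Int)) &&
        PySem.Chars.isalpha (text.toList.getD (i - 1).toNat ' ')))
  || (decide (i < 20) && special_beginning.contains c)

def get_sentence_begin_index_alt (sub_str : String) (text : String) (end_marks : List String) (special_beginning : List String) : Int :=
  let begin_index := PySem.Str.find text sub_str
  (PySem.List.pyRange 0 (begin_index + 1) 1).foldl
    (fun result i => if pvCondB text end_marks special_beginning i then i else result) (-1)

-- ===== PRECONDITION & SPEC =====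
-- Pre_ excludes exactly the inputs where the Python A raises: sub_str not occurring in text
-- (ValueError from text.index) and the empty text with sub_str = "" (IndexError at text[0]).
def Pre_get_sentence_begin_index (sub_str : String) (text : String) (end_marks : List String) (special_beginning : List String) : Prop :=
  sub_str.toList <:+: text.toList ∧ text ≠ ""
instance (sub_str : String) (text : String) (end_marks : List String) (special_beginning : List String) : Decidable (Pre_get_sentence_begin_index sub_str text end_marks special_beginning) := by unfold Pre_get_sentence_begin_index; infer_instance

def pvWitness_get_sentence_begin_index : String × String × List String × List String :=
  ("a", "Hi. b a", [".", "?"], ["H"])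

def Spec_get_sentence_begin_index (sub_str : String) (text : String) (end_marks : List String) (special_beginning : List String) (out : Int) : Prop := out = get_sentence_begin_index_alt sub_str text end_marks special_beginning
instance (sub_str : String) (text : String) (end_marks : List String) (special_beginning : List String) (out : Int) : Decidable (Spec_get_sentence_begin_index sub_str text end_marks special_beginning out) := by unfold Spec_get_sentence_begin_index; infer_instance

-- ===== CLAIM (what is proved, stated in full; the proofs are below) =====
def Claim_equal_get_sentence_begin_index : Prop := ∀ (sub_str : String) (text : String) (end_marks : List String) (special_beginning : List String), Dom_get_sentence_begin_index sub_str text end_marks special_beginning → Pre_get_sentence_begin_index sub_str text end_marks special_beginning → Spec_get_sentence_begin_index sub_str text end_marks special_beginning (get_sentence_begin_index sub_str text end_marks special_beginning)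

-- ===== LEMMAS AND PROOFS =====

-- the two boundary predicates agree
theorem pvCond_eq (text : String) (em sb : List String) (i : Int) :
    pvCondA text em sb i = pvCondB text em sb i := by
  unfold pvCondA pvCondB pv_forward_alpha
  simp only [beq_iff_eq]
  split_ifs with h1 h2 h3 <;> simp_all <;> omega

-- A's backward early-exit scan equals B's forward last-boundary fold
theorem pvLoop_eq (text : String) (em sb : List String) : ∀ n : Nat,
    pvLoopA text em sb (n : Int) =
      (PySem.List.pyRange 0 ((n : Int) + 1) 1).foldl
        (fun result i => if pvCondB text em sb i then i else result) (-1) := by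
  intro n
  induction n with
  | zero =>
      rw [pvLoopA]
      rw [show ((0 : Nat) : Int) + 1 = 0 + 1 by omega,
        PySem.List.pyRange_one_singleton]
      rw [pvLoopA]
      simp [pvCond_eq]
  | succ k ih =>
      rw [pvLoopA]
      rw [show ((k + 1 : Nat) : Int) = (k : Int) + 1 by push_cast; ring,
        PySem.List.pyRange_one_succ_right (by omega : (0:Int) ≤ (k : Int) + 1),
        List.foldl_append]
      simp only [List.foldl_cons, List.foldl_nil]
      rw [dif_pos (by omega : (0:Int) ≤ (k : Int) + 1), pvCond_eq]
      by_cases hb : pvCondB text em sb ((k : Int) + 1)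
      · rw [if_pos hb, if_pos hb]
      · rw [if_neg hb, if_neg hb, show (k : Int) + 1 - 1 = (k : Int) by ring, ih]

-- ===== VERDICT (by name: the statement is the Claim_ definition above) =====
theorem get_sentence_begin_index_spec : Claim_equal_get_sentence_begin_index := by
  unfold Claim_equal_get_sentence_begin_index
  intro sub_str text em sb _ hpre
  unfold Spec_get_sentence_begin_index get_sentence_begin_index get_sentence_begin_index_alt
  have hfind : 0 ≤ PySem.Str.find text sub_str := by
    rw [PySem.Str.find_nonneg_iff]; exact hpre.1
  have hn : PySem.Str.find text sub_str = ((PySem.Str.find text sub_str).toNat : Int) :=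
    (Int.toNat_of_nonneg hfind).symm
  rw [hn]
  exact pvLoop_eq text em sb _
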